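-- pv_equiv track=rewrite | github.com/SeungMin-Park-psm1757/MVP_Military_basic_rule_finder | streamlit_app.py | summarize_filter_groups
-- ===== SOURCE A (Python) =====
-- SOURCE_TYPE_ORDER = [
--     "law_text",
--     "revision_reason",
--     "old_new_comparison",
--     "history_note",
-- ]
--
-- FILTER_GROUP_ORDER = ["법령", "개정이유", "신구 비교", "기타"]
--
-- FILTER_GROUP_SOURCE_TYPES = {
--     "법령": ["law_text"],
--     "개정이유": ["revision_reason"],
--     "신구 비교": ["old_new_comparison"],
-- }
--
-- def ordered_source_types(source_types: list[str]) -> list[str]: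
--     known = [value for value in SOURCE_TYPE_ORDER if value in source_types]
--     extra = sorted(value for value in source_types if value not in SOURCE_TYPE_ORDER)
--     return known + extra
--
-- def _other_source_types(source_types: list[str]) -> list[str]:
--     primary = {value for values in FILTER_GROUP_SOURCE_TYPES.values() for value in values}
--     return [value for value in ordered_source_types(source_types) if value not in primary]
--
-- def summarize_filter_groups(source_types: list[str], all_source_types: list[str]) -> list[str]:
--     selected = set(source_types)
--     summary: list[str] = []
--     for label in FILTER_GROUP_ORDER:
--         if label == "기타":
--             if any(value in selected for value in _other_source_types(all_source_types)):
--                 summary.append(label)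
--             continue
--         if any(value in selected for value in FILTER_GROUP_SOURCE_TYPES[label]):
--             summary.append(label)
--     return summary
-- ===== SOURCE B (Python) =====
-- FILTER_GROUP_ORDER = ["법령", "개정이유", "신구 비교", "기타"]
--
-- _PRIMARY_LABEL = {
--     "law_text": "법령",
--     "revision_reason": "개정이유",
--     "old_new_comparison": "신구 비교",
-- }
--
-- def summarize_filter_groups(source_types: list[str], all_source_types: list[str]) -> list[str]:
--     universe = set(all_source_types)
--     present = set()
--     for value in source_types:
--         label = _PRIMARY_LABEL.get(value)
--         if label is not None:
--             present.add(label)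
--         elif value in universe:
--             present.add("기타")
--     return [label for label in FILTER_GROUP_ORDER if label in present]
-- ===== Notes on version B (the rewrite author's own statement) =====
-- stated objective: simpler
-- what changed: Replaces the per-label scans over a reordered-and-sorted copy of all_source_types with a reverse primary-type-to-label dict and one pass over source_types collecting the present labels, then filters FILTER_GROUP_ORDER by that set.
import Mathlib
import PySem

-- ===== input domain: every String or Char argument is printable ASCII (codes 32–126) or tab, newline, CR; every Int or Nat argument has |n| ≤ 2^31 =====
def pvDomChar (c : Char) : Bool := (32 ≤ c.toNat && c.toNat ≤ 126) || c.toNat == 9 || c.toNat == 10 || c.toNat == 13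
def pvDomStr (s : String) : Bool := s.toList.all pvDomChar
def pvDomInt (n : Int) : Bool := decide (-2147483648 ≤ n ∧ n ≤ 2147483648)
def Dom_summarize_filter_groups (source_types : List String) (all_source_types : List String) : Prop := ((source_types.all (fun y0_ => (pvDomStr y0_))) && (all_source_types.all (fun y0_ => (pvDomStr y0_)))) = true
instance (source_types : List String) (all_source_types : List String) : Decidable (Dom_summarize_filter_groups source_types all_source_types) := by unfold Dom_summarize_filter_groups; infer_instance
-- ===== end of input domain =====

-- B replaces A's per-label scans over a sorted/reordered copy of all_source_types
-- with a reverse primary-type→label map and a single pass over source_types (objective: simpler).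


-- ===== PORT A =====
def SOURCE_TYPE_ORDER : List String :=
  ["law_text", "revision_reason", "old_new_comparison", "history_note"]

def FILTER_GROUP_ORDER : List String := ["법령", "개정이유", "신구 비교", "기타"]

def FILTER_GROUP_SOURCE_TYPES : PySem.Dict String (List String) :=
  PySem.Dict.ofList
    [("법령", ["law_text"]), ("개정이유", ["revision_reason"]), ("신구 비교", ["old_new_comparison"])]

def ordered_source_types (source_types : List String) : List String :=
  (SOURCE_TYPE_ORDER.filter (fun value => source_types.contains value)) ++
    PySem.List.sorted (source_types.filter (fun value => !SOURCE_TYPE_ORDER.contains value))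
      (fun x => x) false

def other_source_types (source_types : List String) : List String :=
  let primary : PySem.Set String :=
    PySem.Set.ofList ((PySem.Dict.values FILTER_GROUP_SOURCE_TYPES).flatMap (fun values => values))
  (ordered_source_types source_types).filter (fun value => !(PySem.Set.contains primary value))

def summarize_filter_groups (source_types : List String) (all_source_types : List String) : List String :=
  let selected : PySem.Set String := PySem.Set.ofList source_types
  FILTER_GROUP_ORDER.foldl (fun summary label =>
    if label = "기타" then
      if (other_source_types all_source_types).any (fun value => PySem.Set.contains selected value) then
        summary ++ [label]
      else summary
    else
      -- FILTER_GROUP_SOURCE_TYPES[label]: the key is always present for the non-"기타" labels,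
      -- so Python's KeyError is unreachable; getD [] is exact here.
      if ((PySem.Dict.get? FILTER_GROUP_SOURCE_TYPES label).getD []).any
          (fun value => PySem.Set.contains selected value) then
        summary ++ [label]
      else summary) []

-- ===== PORT B =====
def PRIMARY_LABEL : PySem.Dict String String :=
  PySem.Dict.ofList
    [("law_text", "법령"), ("revision_reason", "개정이유"), ("old_new_comparison", "신구 비교")]

-- the one-pass loop of Source B collecting the set of present labels
def pvPresent (source_types : List String) (all_source_types : List String) : PySem.Set String :=
  let univ_ : PySem.Set String := PySem.Set.ofList all_source_types
  source_types.foldl (fun present value =>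
    match PySem.Dict.get? PRIMARY_LABEL value with
    | some label => PySem.Set.add present label
    | none =>
      if PySem.Set.contains univ_ value then PySem.Set.add present "기타" else present)
    PySem.Set.empty

def summarize_filter_groups_alt (source_types : List String) (all_source_types : List String) : List String :=
  let present := pvPresent source_types all_source_types
  FILTER_GROUP_ORDER.filter (fun label => PySem.Set.contains present label)

-- ===== PRECONDITION & SPEC =====
def Spec_summarize_filter_groups (source_types : List String) (all_source_types : List String) (out : List String) : Prop := out = summarize_filter_groups_alt source_types all_source_types
instance (source_types : List String) (all_source_types : List String) (out : List String) : Decidable (Spec_summarize_filter_groups source_types all_source_types out) := by unfold Spec_summarize_filter_groups; infer_instance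

-- ===== CLAIM (what is proved, stated in full; the proofs are below) =====
def Claim_equal_summarize_filter_groups : Prop := ∀ (source_types : List String) (all_source_types : List String), Dom_summarize_filter_groups source_types all_source_types → Spec_summarize_filter_groups source_types all_source_types (summarize_filter_groups source_types all_source_types)

-- ===== LEMMAS AND PROOFS =====

-- membership in B's fold-built present set
theorem mem_pvPresent_fold (s : List String) (a : List String) (acc : PySem.Set String) (label : String) :
    label ∈ s.foldl (fun present value =>
      match PySem.Dict.get? PRIMARY_LABEL value with
      | some l => PySem.Set.add present l
      | none =>
        if PySem.Set.contains (PySem.Set.ofList a) value then PySem.Set.add present "기타" else present) acc ↔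
    label ∈ acc ∨ ∃ v ∈ s,
      (match PySem.Dict.get? PRIMARY_LABEL v with
       | some l => l = label
       | none => v ∈ a ∧ label = "기타") := by
  induction s generalizing acc with
  | nil => simp
  | cons x xs ih =>
    simp only [List.foldl_cons]
    cases h : PySem.Dict.get? PRIMARY_LABEL x with
    | some l =>
      simp only [ih, PySem.Set.mem_add, List.mem_cons]
      constructor
      · rintro ((h1|h1)|h1)
        · exact Or.inl h1
        · exact Or.inr ⟨x, Or.inl rfl, by simp [h, h1]⟩
        · rcases h1 with ⟨v, hv, hm⟩; exact Or.inr ⟨v, Or.inr hv, hm⟩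
      · rintro (h1|⟨v, (rfl|hv), hm⟩)
        · exact Or.inl (Or.inl h1)
        · simp only [h] at hm; exact Or.inl (Or.inr hm.symm)
        · exact Or.inr ⟨v, hv, hm⟩
    | none =>
      by_cases hc : PySem.Set.contains (PySem.Set.ofList a) x = true
      · simp only [if_pos hc]
        rw [PySem.Set.contains_iff, PySem.Set.mem_ofList] at hc
        simp only [ih, PySem.Set.mem_add, List.mem_cons]
        constructor
        · rintro ((h1|h1)|h1)
          · exact Or.inl h1
          · exact Or.inr ⟨x, Or.inl rfl, by simp [h]; exact ⟨hc, h1⟩⟩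
          · rcases h1 with ⟨v, hv, hm⟩; exact Or.inr ⟨v, Or.inr hv, hm⟩
        · rintro (h1|⟨v, (rfl|hv), hm⟩)
          · exact Or.inl (Or.inl h1)
          · simp only [h] at hm; exact Or.inl (Or.inr hm.2)
          · exact Or.inr ⟨v, hv, hm⟩
      · simp only [if_neg hc]
        rw [PySem.Set.contains_iff, PySem.Set.mem_ofList] at hc
        simp only [ih, List.mem_cons]
        constructor
        · rintro (h1|⟨v, hv, hm⟩)
          · exact Or.inl h1
          · exact Or.inr ⟨v, Or.inr hv, hm⟩
        · rintro (h1|⟨v, (rfl|hv), hm⟩)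
          · exact Or.inl h1
          · simp only [h] at hm; exact absurd hm.1 hc
          · exact Or.inr ⟨v, hv, hm⟩

-- the literal dicts in Dict.mk form
theorem primary_mk : PRIMARY_LABEL = PySem.Dict.mk
    [("law_text", "법령"), ("revision_reason", "개정이유"), ("old_new_comparison", "신구 비교")] := by decide

theorem fgst_mk : FILTER_GROUP_SOURCE_TYPES = PySem.Dict.mk
    [("법령", ["law_text"]), ("개정이유", ["revision_reason"]), ("신구 비교", ["old_new_comparison"])] := by decide

-- the primary reverse dict, looked up at an arbitrary key
theorem primary_get (v : String) :
    PySem.Dict.get? PRIMARY_LABEL v =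
      if v = "law_text" then some "법령"
      else if v = "revision_reason" then some "개정이유"
      else if v = "old_new_comparison" then some "신구 비교"
      else none := by
  rw [primary_mk]
  simp only [PySem.Dict.get?_mk_cons, beq_iff_eq]
  have h0 : (PySem.Dict.mk ([] : List (String × String))).get? v = none := rfl
  rw [h0]
  by_cases h1 : v = "law_text"
  · subst h1; simp
  · rw [if_neg (fun h => h1 h.symm), if_neg h1]
    by_cases h2 : v = "revision_reason"
    · subst h2; simp
    · rw [if_neg (fun h => h2 h.symm), if_neg h2]
      by_cases h3 : v = "old_new_comparison"
      · subst h3; simp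
      · rw [if_neg (fun h => h3 h.symm), if_neg h3]

-- membership in A's other_source_types
theorem mem_other (a : List String) (v : String) :
    v ∈ other_source_types a ↔
      v ∈ a ∧ v ≠ "law_text" ∧ v ≠ "revision_reason" ∧ v ≠ "old_new_comparison" := by
  unfold other_source_types ordered_source_types
  rw [fgst_mk]
  simp [List.mem_filter, List.mem_append, PySem.List.mem_sorted, SOURCE_TYPE_ORDER,
    PySem.Set.mem_ofList, PySem.Dict.values_mk]
  tauto

-- a primary label is present in B's set iff its source type was selected
theorem present_primary (s a : List String) (t lab : String)
    (ht : PySem.Dict.get? PRIMARY_LABEL t = some lab)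
    (huniq : ∀ v, PySem.Dict.get? PRIMARY_LABEL v = some lab → v = t) :
    ("기타" ≠ lab) → (lab ∈ pvPresent s a ↔ t ∈ s) := by
  intro hne
  unfold pvPresent
  rw [mem_pvPresent_fold]
  simp only [PySem.Set.empty, List.not_mem_nil, false_or]
  constructor
  · rintro ⟨v, hv, hm⟩
    cases h : PySem.Dict.get? PRIMARY_LABEL v with
    | some l =>
      rw [h] at hm; subst hm
      exact huniq v h ▸ hv
    | none => rw [h] at hm; exact absurd hm.2.symm hne
  · intro hts; exact ⟨t, hts, by rw [ht]⟩

-- "기타" is present in B's set iff some selected non-primary type is in the universe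
theorem present_other (s a : List String) :
    ("기타" ∈ pvPresent s a) ↔
      ∃ v ∈ s, v ∈ a ∧ v ≠ "law_text" ∧ v ≠ "revision_reason" ∧ v ≠ "old_new_comparison" := by
  unfold pvPresent
  rw [mem_pvPresent_fold]
  simp only [PySem.Set.empty, List.not_mem_nil, false_or]
  constructor
  · rintro ⟨v, hv, hm⟩
    cases h : PySem.Dict.get? PRIMARY_LABEL v with
    | some l =>
      rw [h] at hm; subst hm
      rw [primary_get v] at h
      split_ifs at h <;> simp_all
    | none =>
      rw [h] at hm
      rw [primary_get v] at h
      split_ifs at h with h1 h2 h3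
      exact ⟨v, hv, hm.1, h1, h2, h3⟩
  · rintro ⟨v, hv, ha, h1, h2, h3⟩
    refine ⟨v, hv, ?_⟩
    rw [primary_get v, if_neg h1, if_neg h2, if_neg h3]
    exact ⟨ha, trivial⟩

theorem summarize_filter_groups_spec : Claim_equal_summarize_filter_groups := by
  intro s a _
  show summarize_filter_groups s a = summarize_filter_groups_alt s a
  have e1 : ("법령" ∈ pvPresent s a ↔ "law_text" ∈ s) :=
    present_primary s a _ _ (by decide) (by intro v h; rw [primary_get v] at h; split_ifs at h with h1 h2 h3 <;> simp_all) (by decide)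
  have e2 : ("개정이유" ∈ pvPresent s a ↔ "revision_reason" ∈ s) :=
    present_primary s a _ _ (by decide) (by intro v h; rw [primary_get v] at h; split_ifs at h with h1 h2 h3 <;> simp_all) (by decide)
  have e3 : ("신구 비교" ∈ pvPresent s a ↔ "old_new_comparison" ∈ s) :=
    present_primary s a _ _ (by decide) (by intro v h; rw [primary_get v] at h; split_ifs at h with h1 h2 h3 <;> simp_all) (by decide)
  have e4 := present_other s a
  have hA4 : ((other_source_types a).any (fun v => PySem.Set.contains (PySem.Set.ofList s) v) = true)
      ↔ ∃ v ∈ s, v ∈ a ∧ v ≠ "law_text" ∧ v ≠ "revision_reason" ∧ v ≠ "old_new_comparison" := by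
    simp only [List.any_eq_true, PySem.Set.contains_iff, PySem.Set.mem_ofList, mem_other]
    constructor
    · rintro ⟨x, ⟨ha, hn⟩, hs⟩; exact ⟨x, hs, ha, hn⟩
    · rintro ⟨v, hs, ha, hn⟩; exact ⟨v, ⟨ha, hn⟩, hs⟩
  unfold summarize_filter_groups summarize_filter_groups_alt FILTER_GROUP_ORDER
  simp only [List.foldl, List.filter]
  by_cases h1 : "law_text" ∈ s <;> by_cases h2 : "revision_reason" ∈ s <;>
    by_cases h3 : "old_new_comparison" ∈ s <;>
    by_cases h4 : ∃ v ∈ s, v ∈ a ∧ v ≠ "law_text" ∧ v ≠ "revision_reason" ∧ v ≠ "old_new_comparison" <;>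
    simp_all [fgst_mk, PySem.Dict.get?_mk_cons, PySem.Set.mem_ofList]
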